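-- pv_equiv track=rewrite | github.com/Alva-Kl/colette | colette_cli/utils/helpers.py | build_projects_by_machine
-- ===== SOURCE A (Python) =====
-- def build_projects_by_machine(projects, filter_machine=None):
--     """Group projects by machine, optionally filtered by machine name."""
--     by_machine = {}
--     for p in projects:
--         m = p.get("machine", "unknown")
--         if filter_machine and m != filter_machine:
--             continue
--         by_machine.setdefault(m, []).append(p)
--     return by_machine
-- ===== SOURCE B (Python) =====
-- def _group(ps):
--     if not ps:
--         return {}
--     m = ps[0].get("machine", "unknown")
--     out = {m: [p for p in ps if p.get("machine", "unknown") == m]}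
--     out.update(_group([q for q in ps[1:] if q.get("machine", "unknown") != m]))
--     return out
--
--
-- def build_projects_by_machine(projects, filter_machine=None):
--     """Group projects by machine, optionally filtered by machine name."""
--     kept = [p for p in projects
--             if not (filter_machine and p.get("machine", "unknown") != filter_machine)]
--     return _group(kept)
-- ===== Notes on version B (the rewrite author's own statement) =====
-- stated objective: alternative
-- what changed: Replaces A's single-pass setdefault accumulation into a dict with a filter-then-recursive-partition scheme: the kept projects are filtered once, then the grouper repeatedly takes the first project's machine, splits the list into that machine's group and the remainder, and recurses on the remainder.
import Mathlib
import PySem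

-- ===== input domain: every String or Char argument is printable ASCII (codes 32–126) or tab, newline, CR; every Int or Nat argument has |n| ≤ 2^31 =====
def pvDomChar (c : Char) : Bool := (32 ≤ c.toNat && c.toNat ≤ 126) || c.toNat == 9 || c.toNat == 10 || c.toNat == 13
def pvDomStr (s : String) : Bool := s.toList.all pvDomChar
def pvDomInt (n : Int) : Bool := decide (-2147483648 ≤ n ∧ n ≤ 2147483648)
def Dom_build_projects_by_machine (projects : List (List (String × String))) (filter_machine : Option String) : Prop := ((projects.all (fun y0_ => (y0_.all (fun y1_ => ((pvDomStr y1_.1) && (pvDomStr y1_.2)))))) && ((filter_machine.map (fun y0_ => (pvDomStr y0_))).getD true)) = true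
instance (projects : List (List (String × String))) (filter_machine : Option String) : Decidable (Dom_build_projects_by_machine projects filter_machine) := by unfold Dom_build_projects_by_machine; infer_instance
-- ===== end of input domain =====

-- B regroups by a different decomposition: filter the kept projects once, then recursively
-- partition — take the first project's machine, split off its whole group, recurse on the
-- remainder (alternative algorithm, same return value as A's single-pass setdefault dict).


-- ===== PORT A =====
-- p.get("machine", "unknown") and the guard 'filter_machine and m != filter_machine'
def pvGetMachine (p : List (String × String)) : String :=
  (PySem.Dict.mk p).getD "machine" "unknown"

-- keep p ↔ NOT (filter_machine truthy and m != filter_machine); '' is falsy in Python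
def pvKeep (filter_machine : Option String) (m : String) : Bool :=
  match filter_machine with
  | none => true
  | some s => s == "" || m == s

def build_projects_by_machine (projects : List (List (String × String))) (filter_machine : Option String) : List (String × List (List (String × String))) :=
  (projects.foldl (fun by_machine p =>
      let m := pvGetMachine p
      if pvKeep filter_machine m then
        -- by_machine.setdefault(m, []).append(p)
        by_machine.modify m [] (fun l => l ++ [p])
      else by_machine)
    PySem.Dict.empty).items

-- ===== PORT B =====
-- _group: take the first project's machine, split off its group, recurse on the remainder
def pvGroup : List (List (String × String)) → List (String × List (List (String × String)))
  | [] => []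
  | p :: tl =>
    let m := pvGetMachine p
    (m, (p :: tl).filter (fun q => pvGetMachine q == m)) ::
      pvGroup (tl.filter (fun q => !(pvGetMachine q == m)))
termination_by ps => ps.length
decreasing_by
  simp only [List.length_cons, List.length_unattach, Nat.lt_succ_iff]
  exact le_trans (List.length_filter_le _ _) (by simp)

-- 'not (filter_machine and p.get("machine","unknown") != filter_machine)'
def pvKept (filter_machine : Option String) (p : List (String × String)) : Bool :=
  !(match filter_machine with
    | none => false
    | some s => decide (s ≠ "") && decide (pvGetMachine p ≠ s))

def build_projects_by_machine_alt (projects : List (List (String × String))) (filter_machine : Option String) : List (String × List (List (String × String))) :=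
  pvGroup (projects.filter (pvKept filter_machine))

-- ===== PRECONDITION & SPEC =====
def Spec_build_projects_by_machine (projects : List (List (String × String))) (filter_machine : Option String) (out : List (String × List (List (String × String)))) : Prop := out = build_projects_by_machine_alt projects filter_machine
instance (projects : List (List (String × String))) (filter_machine : Option String) (out : List (String × List (List (String × String)))) : Decidable (Spec_build_projects_by_machine projects filter_machine out) := by unfold Spec_build_projects_by_machine; infer_instance

-- ===== CLAIM (what is proved, stated in full; the proofs are below) =====
def Claim_equal_build_projects_by_machine : Prop := ∀ (projects : List (List (String × String))) (filter_machine : Option String), Dom_build_projects_by_machine projects filter_machine → Spec_build_projects_by_machine projects filter_machine (build_projects_by_machine projects filter_machine)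

-- ===== LEMMAS AND PROOFS =====

-- the two spellings of the keep-guard agree
theorem keep_eq_kept (filter_machine : Option String) (p : List (String × String)) :
    pvKeep filter_machine (pvGetMachine p) = pvKept filter_machine p := by
  cases filter_machine with
  | none => rfl
  | some s =>
    simp [pvKeep, pvKept]
    by_cases h : s = "" <;> by_cases h' : pvGetMachine p = s <;> simp [h, h']

-- A, rewritten as a grouping over the pre-filtered list l'
theorem A_char (projects : List (List (String × String))) (filter_machine : Option String) :
    build_projects_by_machine projects filter_machine =
      (PySem.Set.ofList ((projects.filter (fun p => pvKeep filter_machine (pvGetMachine p))).map pvGetMachine)).map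
        (fun m => (m, (projects.filter (fun p => pvKeep filter_machine (pvGetMachine p))).filter
          (fun p => pvGetMachine p == m))) := by
  set l' := projects.filter (fun p => pvKeep filter_machine (pvGetMachine p)) with hl'
  have hfold : build_projects_by_machine projects filter_machine =
      (l'.foldl (fun d p => d.modify (pvGetMachine p) [] (fun l => l ++ [p])) PySem.Dict.empty).items := by
    unfold build_projects_by_machine
    rw [hl', List.foldl_filter]
  rw [hfold]
  set D := l'.foldl (fun d p => d.modify (pvGetMachine p) [] (fun l => l ++ [p])) PySem.Dict.empty with hD
  have hkeys : D.keys = PySem.Set.ofList (l'.map pvGetMachine) := by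
    rw [hD]
    rw [PySem.Dict.keys_foldl_modify_key l' pvGetMachine [] (fun _ x => fun v => v ++ [x]) PySem.Dict.empty]
    simp [PySem.Dict.keys_empty, PySem.Set.update_nil_left]
  have hnd : D.keys.Nodup := by
    rw [hD]
    exact PySem.Dict.nodup_keys_foldl_modify_key l' pvGetMachine [] (fun _ x => fun v => v ++ [x])
      PySem.Dict.empty (by simp [PySem.Dict.keys_empty])
  have hgetD : ∀ m, D.getD m [] = l'.filter (fun p => pvGetMachine p == m) := by
    intro m
    have hm : D = (l'.map (fun p => (pvGetMachine p, p))).foldl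
        (fun d q => d.modify q.1 [] (fun l => l ++ [q.2])) PySem.Dict.empty := by
      rw [hD, List.foldl_map]
    rw [hm, PySem.Dict.getD_foldl_modify_append]
    simp [PySem.Dict.getD_empty, List.filter_map, Function.comp_def, List.map_map]
  rw [PySem.Dict.items_eq_map_keys D hnd [], hkeys]
  exact List.map_congr_left (fun m _ => by rw [hgetD m])

-- updating a set with elements none of which lies in the prefix t keeps t a prefix
theorem update_append_left {α : Type} [DecidableEq α] :
    ∀ (ys t s : List α), (∀ y ∈ ys, y ∉ t) →
      PySem.Set.update (t ++ s) ys = t ++ PySem.Set.update s ys := by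
  intro ys
  induction ys with
  | nil => intro t s _; rfl
  | cons y ys ih =>
    intro t s h
    have hy : y ∉ t := h y (by simp)
    have hadd : PySem.Set.add (t ++ s) y = t ++ PySem.Set.add s y := by
      by_cases hys : y ∈ s <;>
        simp [PySem.Set.add, PySem.Set.contains, hys, hy, List.append_assoc]
    simp only [PySem.Set.update, List.foldl_cons] at *
    rw [hadd]
    exact ih t (PySem.Set.add s y) (fun z hz => h z (by simp [hz]))

-- elements already equal to a set member can be dropped from an update list
theorem update_filter_ne {α : Type} [DecidableEq α] (x : α) :
    ∀ (xs s : List α), x ∈ s →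
      PySem.Set.update s (xs.filter (fun y => y ≠ x)) = PySem.Set.update s xs := by
  intro xs
  induction xs with
  | nil => intro s _; rfl
  | cons y ys ih =>
    intro s hx
    by_cases h : y = x
    · subst h
      have hadd : PySem.Set.add s y = s := by
        simp [PySem.Set.add, PySem.Set.contains, hx]
      have hrfl : PySem.Set.update s (y :: ys) = PySem.Set.update (PySem.Set.add s y) ys := rfl
      rw [List.filter_cons_of_neg (by simp), hrfl, hadd]
      exact ih s hx
    · have hrfl : PySem.Set.update s (y :: ys) = PySem.Set.update (PySem.Set.add s y) ys := rfl
      have hrfl2 : PySem.Set.update s (y :: ys.filter (fun y => y ≠ x)) =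
          PySem.Set.update (PySem.Set.add s y) (ys.filter (fun y => y ≠ x)) := rfl
      rw [List.filter_cons_of_pos (by simp [h]), hrfl, hrfl2]
      refine ih (PySem.Set.add s y) ?_
      unfold PySem.Set.add
      split <;> simp [hx]

-- first-occurrence dedup, one step: take the head, drop its duplicates from the tail
theorem ofList_cons {α : Type} [DecidableEq α] (x : α) (xs : List α) :
    PySem.Set.ofList (x :: xs) = x :: PySem.Set.ofList (xs.filter (fun y => y ≠ x)) := by
  have h0 : PySem.Set.ofList (x :: xs) = PySem.Set.update ([x] ++ []) xs := by
    simp [PySem.Set.ofList_eq_foldl, PySem.Set.update, PySem.Set.add, PySem.Set.contains]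
  have h2 := update_filter_ne x xs ([x] ++ []) (by simp)
  have h3 : PySem.Set.update ([x] ++ []) (xs.filter (fun y => y ≠ x)) =
      [x] ++ PySem.Set.update [] (xs.filter (fun y => y ≠ x)) := by
    refine update_append_left _ [x] [] ?_
    intro y hy
    have := (List.mem_filter.mp hy).2
    simp at this ⊢
    exact this
  rw [h0, ← h2, h3]
  simp [PySem.Set.ofList_eq_foldl, PySem.Set.update]

-- one-step unfoldings of the recursive grouper
theorem pvGroup_nil : pvGroup [] = [] := by rw [pvGroup]

theorem pvGroup_cons (p : List (String × String)) (tl : List (List (String × String))) :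
    pvGroup (p :: tl) =
      (pvGetMachine p, (p :: tl).filter (fun q => pvGetMachine q == pvGetMachine p)) ::
        pvGroup (tl.filter (fun q => !(pvGetMachine q == pvGetMachine p))) := by
  rw [pvGroup]

-- B's recursive grouper computes the first-seen-order grouping of its argument
theorem B_char : ∀ (n : Nat) (l : List (List (String × String))), l.length ≤ n →
    pvGroup l = (PySem.Set.ofList (l.map pvGetMachine)).map
      (fun m => (m, l.filter (fun p => pvGetMachine p == m))) := by
  intro n
  induction n with
  | zero =>
    intro l hl
    have : l = [] := List.eq_nil_of_length_eq_zero (Nat.le_zero.mp hl)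
    subst this
    rw [pvGroup_nil]
    rfl
  | succ n ih =>
    intro l hl
    match l with
    | [] => rw [pvGroup_nil]; rfl
    | p :: tl =>
      have hlen : (tl.filter (fun q => !(pvGetMachine q == pvGetMachine p))).length ≤ n :=
        le_trans (List.length_filter_le _ _) (Nat.succ_le_succ_iff.mp (by simpa using hl))
      rw [pvGroup_cons, ih _ hlen]
      have hmap : (tl.filter (fun q => !(pvGetMachine q == pvGetMachine p))).map pvGetMachine =
          (tl.map pvGetMachine).filter (fun k => k ≠ pvGetMachine p) := by
        rw [List.filter_map]
        congr 1
        apply List.filter_congr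
        intro q _
        by_cases h : pvGetMachine q = pvGetMachine p <;> simp [Function.comp, h]
      have hofl : PySem.Set.ofList ((p :: tl).map pvGetMachine) =
          pvGetMachine p ::
            PySem.Set.ofList ((tl.filter (fun q => !(pvGetMachine q == pvGetMachine p))).map pvGetMachine) := by
        rw [List.map_cons, ofList_cons, ← hmap]
      rw [hofl, List.map_cons]
      congr 1
      apply List.map_congr_left
      intro k hk
      have hkm : k ≠ pvGetMachine p := by
        rw [PySem.Set.mem_ofList] at hk
        obtain ⟨q, hq, hqk⟩ := List.mem_map.mp hk
        have := (List.mem_filter.mp hq).2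
        simp at this
        rw [← hqk]
        exact this
      have hfk : (p :: tl).filter (fun q => pvGetMachine q == k) =
          (tl.filter (fun q => !(pvGetMachine q == pvGetMachine p))).filter
            (fun q => pvGetMachine q == k) := by
        rw [List.filter_cons]
        have hpk : (pvGetMachine p == k) = false := by
          simp
          exact fun h => hkm h.symm
        simp only [hpk, Bool.false_eq_true, reduceIte]
        rw [List.filter_filter]
        apply List.filter_congr
        intro q _
        by_cases h : pvGetMachine q = k <;> simp [h, hkm]
      rw [hfk]

-- ===== VERDICT (by name: the statement is the Claim_ definition above) =====
theorem build_projects_by_machine_spec : Claim_equal_build_projects_by_machine := by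
  intro projects filter_machine _
  unfold Spec_build_projects_by_machine build_projects_by_machine_alt
  have hfe : projects.filter (pvKept filter_machine) =
      projects.filter (fun p => pvKeep filter_machine (pvGetMachine p)) := by
    apply List.filter_congr; intro p _; rw [keep_eq_kept]
  rw [A_char, hfe, B_char (projects.filter (fun p => pvKeep filter_machine (pvGetMachine p))).length _ le_rfl]
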